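-- pv_equiv track=rewrite | github.com/CausalAILab/Causal-RL | imitation/imitate.py | construct_z_sets
-- ===== SOURCE A (Python) =====
-- from typing import Dict, List, Set, Optional, Callable, Any, Tuple
--
-- def construct_z_sets(OX_actions: Set[str], markov_bound: Set[str], boundary_actions: Set[str], ordering: List[str]) -> Dict[str, Set[str]]:
--     Z_sets = {}
--
--     for Xi in OX_actions:
--         before_Xi = set(ordering[:ordering.index(Xi)])
--
--         if Xi not in boundary_actions:
--             Z_sets[Xi] = set()
--         else:
--             Z_sets[Xi] = (markov_bound | boundary_actions) & before_Xi
--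
--     return Z_sets
-- ===== SOURCE B (Python) =====
-- def construct_z_sets(OX_actions, markov_bound, boundary_actions, ordering):
--     # One pass over ordering builds, for each element, a snapshot of the set of
--     # elements strictly before its first occurrence; per-action work then is a
--     # dict lookup plus one intersection instead of an index scan + slice + set build.
--     prefix = {}
--     seen = set()
--     for v in ordering:
--         if v not in prefix:
--             prefix[v] = frozenset(seen)
--         seen.add(v)
--     allowed = markov_bound | boundary_actions
--     return {Xi: (allowed & prefix[Xi] if Xi in boundary_actions else set())
--             for Xi in OX_actions}
-- ===== Notes on version B (the rewrite author's own statement) =====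
-- stated objective: alternative
-- what changed: Instead of re-scanning ordering per action (ordering.index(Xi) plus a fresh set(ordering[:i]) each time), B makes one cumulative pass over ordering that snapshots the prefix set at each element's first occurrence into a dict, so each action's answer is a dict lookup and one intersection.
import Mathlib
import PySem

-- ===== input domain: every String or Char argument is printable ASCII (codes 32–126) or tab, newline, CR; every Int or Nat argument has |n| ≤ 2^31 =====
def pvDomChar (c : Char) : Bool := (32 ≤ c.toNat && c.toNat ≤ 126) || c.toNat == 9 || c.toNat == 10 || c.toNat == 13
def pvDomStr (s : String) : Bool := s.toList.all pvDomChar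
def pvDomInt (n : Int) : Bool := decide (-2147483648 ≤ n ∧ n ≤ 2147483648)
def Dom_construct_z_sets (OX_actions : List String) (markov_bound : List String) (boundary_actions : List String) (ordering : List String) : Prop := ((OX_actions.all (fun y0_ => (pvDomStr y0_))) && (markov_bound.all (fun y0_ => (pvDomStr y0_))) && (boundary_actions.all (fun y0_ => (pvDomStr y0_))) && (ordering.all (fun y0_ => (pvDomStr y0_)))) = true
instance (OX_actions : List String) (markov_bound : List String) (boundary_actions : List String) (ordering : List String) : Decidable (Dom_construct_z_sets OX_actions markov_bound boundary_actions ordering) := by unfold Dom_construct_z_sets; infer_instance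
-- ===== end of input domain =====

-- B replaces A's per-action `ordering.index` + prefix-slice + set build with ONE cumulative
-- pass over `ordering` that snapshots the prefix set at each element's first occurrence;
-- each action is then a dict lookup plus one intersection (objective: alternative).

-- ===== PORT A =====
def construct_z_sets (OX_actions : List String) (markov_bound : List String) (boundary_actions : List String) (ordering : List String) : List (String × List String) :=
  (OX_actions.foldl (fun Z_sets Xi =>
      let before_Xi : PySem.Set String :=
        PySem.Set.ofList (PySem.List.slice ordering none
          (some (((PySem.List.index? ordering Xi).getD 0 : Nat) : Int)))
      if ¬ (boundary_actions.contains Xi) then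
        Z_sets.insert Xi PySem.Set.empty
      else
        Z_sets.insert Xi
          (PySem.Set.inter (PySem.Set.union (PySem.Set.ofList markov_bound) boundary_actions) before_Xi)
    ) PySem.Dict.empty).items

-- ===== PORT B =====
def construct_z_sets_alt (OX_actions : List String) (markov_bound : List String) (boundary_actions : List String) (ordering : List String) : List (String × List String) :=
  -- one pass: `st.1` = the snapshot dict `prefix`, `st.2` = the running set `seen`
  let st := ordering.foldl
    (fun (st : PySem.Dict String (PySem.Set String) × PySem.Set String) v =>
      ((if st.1.contains v then st.1 else st.1.insert v st.2), PySem.Set.add st.2 v))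
    (PySem.Dict.empty, PySem.Set.empty)
  let allowed : PySem.Set String := PySem.Set.union (PySem.Set.ofList markov_bound) boundary_actions
  (OX_actions.foldl (fun d Xi =>
      d.insert Xi
        (if boundary_actions.contains Xi then
          PySem.Set.inter allowed (st.1.getD Xi PySem.Set.empty)
        else PySem.Set.empty)) PySem.Dict.empty).items

-- ===== PRECONDITION & SPEC =====
-- Pre_ excludes the inputs where some OX action is missing from `ordering`: there A's
-- `ordering.index(Xi)` raises ValueError.
def Pre_construct_z_sets (OX_actions : List String) (markov_bound : List String) (boundary_actions : List String) (ordering : List String) : Prop :=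
  ∀ Xi ∈ OX_actions, Xi ∈ ordering
instance (OX_actions : List String) (markov_bound : List String) (boundary_actions : List String) (ordering : List String) : Decidable (Pre_construct_z_sets OX_actions markov_bound boundary_actions ordering) := by unfold Pre_construct_z_sets; infer_instance

def pvWitness_construct_z_sets : List String × List String × List String × List String :=
  (["a", "b"], ["c"], ["b"], ["c", "a", "b"])

def Spec_construct_z_sets (OX_actions : List String) (markov_bound : List String) (boundary_actions : List String) (ordering : List String) (out : List (String × List String)) : Prop := out = construct_z_sets_alt OX_actions markov_bound boundary_actions ordering
instance (OX_actions : List String) (markov_bound : List String) (boundary_actions : List String) (ordering : List String) (out : List (String × List String)) : Decidable (Spec_construct_z_sets OX_actions markov_bound boundary_actions ordering out) := by unfold Spec_construct_z_sets; infer_instance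

-- ===== CLAIM (what is proved, stated in full; the proofs are below) =====
def Claim_equal_construct_z_sets : Prop := ∀ (OX_actions : List String) (markov_bound : List String) (boundary_actions : List String) (ordering : List String), Dom_construct_z_sets OX_actions markov_bound boundary_actions ordering → Pre_construct_z_sets OX_actions markov_bound boundary_actions ordering → Spec_construct_z_sets OX_actions markov_bound boundary_actions ordering (construct_z_sets OX_actions markov_bound boundary_actions ordering)

-- ===== LEMMAS AND PROOFS =====

-- The snapshot dict built by B's single pass: looked up at y it holds the `seen` set
-- as it was just before y's first occurrence.
lemma prefix_get? (xs : List String) (d : PySem.Dict String (PySem.Set String))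
    (s : PySem.Set String) (y : String) :
    ((xs.foldl
      (fun (st : PySem.Dict String (PySem.Set String) × PySem.Set String) v =>
        ((if st.1.contains v then st.1 else st.1.insert v st.2), PySem.Set.add st.2 v))
      (d, s)).1).get? y =
    (if d.contains y then d.get? y
     else (PySem.List.index? xs y).map (fun k => PySem.Set.update s (xs.take k))) := by
  induction xs generalizing d s with
  | nil =>
    simp [PySem.List.index?_eq_idxOf?]
    intro h
    rw [PySem.Dict.contains_eq_isSome_get?] at h
    simp at h
    exact h
  | cons x xs ih =>
    simp only [List.foldl_cons]
    rw [ih]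
    by_cases hdx : d.contains x = true
    · simp only [hdx, if_true]
      by_cases hdy : d.contains y = true
      · simp [hdy]
      · simp only [hdy, Bool.false_eq_true, if_false]
        have hxy : x ≠ y := by
          intro h; subst h; simp [hdy] at hdx
        rw [PySem.List.index?_cons_of_ne xs hxy]
        cases h' : PySem.List.index? xs y with
        | none => simp
        | some m => simp [PySem.Set.update]
    · simp only [hdx, Bool.false_eq_true, if_false]
      by_cases hxy : x = y
      · subst hxy
        have : (d.insert x s).contains x = true := PySem.Dict.contains_insert_self d x s
        simp only [this, if_true]
        rw [PySem.Dict.get?_insert_self, PySem.List.index?_cons_self]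
        simp [hdx, PySem.Set.update]
      · have hc : (d.insert x s).contains y = d.contains y := by
          rw [PySem.Dict.contains_insert d x y s]
          simp [Ne.symm hxy]
        rw [hc]
        by_cases hdy : d.contains y = true
        · simp [hdy, PySem.Dict.get?_insert_of_ne d s (Ne.symm hxy)]
        · simp only [hdy, Bool.false_eq_true, if_false]
          rw [PySem.List.index?_cons_of_ne xs hxy]
          cases h' : PySem.List.index? xs y with
          | none => simp
          | some m => simp [PySem.Set.update]

-- At an action present in `ordering`, B's snapshot is exactly A's prefix set.
lemma snapshot_eq (ordering : List String) (Xi : String) (hXi : Xi ∈ ordering) :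
    ((ordering.foldl
      (fun (st : PySem.Dict String (PySem.Set String) × PySem.Set String) v =>
        ((if st.1.contains v then st.1 else st.1.insert v st.2), PySem.Set.add st.2 v))
      (PySem.Dict.empty, PySem.Set.empty)).1).getD Xi PySem.Set.empty =
    PySem.Set.ofList (PySem.List.slice ordering none
      (some (((PySem.List.index? ordering Xi).getD 0 : Nat) : Int))) := by
  have hsome : (PySem.List.index? ordering Xi).isSome :=
    (PySem.List.index?_isSome_iff ordering Xi).mpr hXi
  obtain ⟨i, hi⟩ := Option.isSome_iff_exists.mp hsome
  rw [PySem.Dict.getD_eq_get?_getD, prefix_get? ordering PySem.Dict.empty PySem.Set.empty Xi]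
  simp only [PySem.Dict.contains_empty, Bool.false_eq_true, if_false, hi, Option.map_some,
    Option.getD_some]
  rw [PySem.List.slice_to_natCast]
  rw [PySem.Set.ofList_eq_foldl]
  rfl

-- ===== VERDICT (by name: the statement is the Claim_ definition above) =====
theorem construct_z_sets_spec : Claim_equal_construct_z_sets := by
  intro OX mb ba ordering _ hpre
  unfold Spec_construct_z_sets construct_z_sets construct_z_sets_alt
  congr 1
  apply PySem.List.foldl_congr_mem
  intro Z Xi hXi
  by_cases hb : ba.contains Xi = true
  · simp only [hb, not_true_eq_false, if_false, if_true]
    rw [snapshot_eq ordering Xi (hpre Xi hXi)]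
  · have hb' : Xi ∉ ba := by simpa using hb
    simp [hb']
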